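-- pv_equiv track=rewrite | github.com/Safaet-Rabbi/Python | Codeforce/136B.py | find_b
-- ===== SOURCE A (Python) =====
-- def to_ternary(n):
--     ternary = []
--     if n == 0:
--         return [0]
--     while n > 0:
--         ternary.append(n % 3)
--         n //= 3
--     return ternary[::-1]
--
-- def from_ternary(ternary):
--     n = 0
--     for digit in ternary:
--         n = n * 3 + digit
--     return n
--
-- def find_b(a, c):
--     ternary_a = to_ternary(a)
--     ternary_c = to_ternary(c)
--
--     while len(ternary_a) < len(ternary_c):
--         ternary_a.insert(0, 0)
--     while len(ternary_c) < len(ternary_a):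
--         ternary_c.insert(0, 0)
--
--     b_digits = [(c_i - a_i) % 3 for a_i, c_i in zip(ternary_a, ternary_c)]
--     return from_ternary(b_digits)
-- ===== SOURCE B (Python) =====
-- def find_b(a, c):
--     result = 0
--     power = 1
--     while a > 0 or c > 0:
--         da = a % 3 if a > 0 else 0
--         dc = c % 3 if c > 0 else 0
--         result += ((dc - da) % 3) * power
--         power *= 3
--         if a > 0:
--             a //= 3
--         if c > 0:
--             c //= 3
--     return result
-- ===== Notes on version B (the rewrite author's own statement) =====
-- stated objective: simpler
-- what changed: B replaces the build-two-ternary-lists / pad / zip / reconvert pipeline with a single LSB-first loop that consumes a and c directly, accumulating ((c%3 - a%3)%3)*power.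
import Mathlib
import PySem

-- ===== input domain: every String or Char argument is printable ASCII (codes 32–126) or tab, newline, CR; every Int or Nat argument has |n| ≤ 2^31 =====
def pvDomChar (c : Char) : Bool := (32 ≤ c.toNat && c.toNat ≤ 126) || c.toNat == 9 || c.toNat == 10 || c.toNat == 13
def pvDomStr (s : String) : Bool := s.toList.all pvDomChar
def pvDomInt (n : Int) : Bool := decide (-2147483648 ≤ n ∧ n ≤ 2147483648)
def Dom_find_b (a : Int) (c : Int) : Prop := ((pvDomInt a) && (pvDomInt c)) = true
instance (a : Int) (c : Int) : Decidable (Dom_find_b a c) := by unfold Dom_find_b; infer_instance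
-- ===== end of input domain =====

-- B replaces A's build-two-ternary-lists / pad / zip / reconvert pipeline with a single
-- LSB-first arithmetic loop over a and c; objective: simpler (no lists at all).

-- termination helper for the `while n > 0: … n //= 3` loops, cited by the ports
theorem pv_fd3_lt (n : Int) (h : 0 < n) : (PySem.Int.floordiv n 3).toNat < n.toNat := by
  rw [PySem.Int.floordiv_eq_ediv_of_pos (by norm_num)]; omega

-- ===== PORT A =====
-- while n > 0: ternary.append(n % 3); n //= 3
def toTernaryLoop (n : Int) (acc : List Int) : List Int :=
  if 0 < n then toTernaryLoop (PySem.Int.floordiv n 3) (acc ++ [PySem.Int.mod n 3]) else acc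
termination_by n.toNat
decreasing_by exact pv_fd3_lt _ (by assumption)

def to_ternary (n : Int) : List Int :=
  if n = 0 then [0]
  else (toTernaryLoop n []).reverse   -- ternary[::-1] (full reverse; exact for any list)

-- for digit in ternary: n = n * 3 + digit
def from_ternary (ternary : List Int) : Int :=
  ternary.foldl (fun n digit => n * 3 + digit) 0

-- while len(xs) < target: xs.insert(0, 0)
def padLoop (xs : List Int) (target : Nat) : List Int :=
  if xs.length < target then padLoop (0 :: xs) target else xs
termination_by target - xs.length

def find_b (a : Int) (c : Int) : Int :=
  let ternary_a := to_ternary a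
  let ternary_c := to_ternary c
  let ternary_a := padLoop ternary_a ternary_c.length
  let ternary_c := padLoop ternary_c ternary_a.length
  let b_digits := List.zipWith (fun a_i c_i => PySem.Int.mod (c_i - a_i) 3) ternary_a ternary_c
  from_ternary b_digits

-- ===== PORT B =====
-- while a > 0 or c > 0: accumulate ((dc - da) % 3) * power, power *= 3
def altLoop (a c result power : Int) : Int :=
  if 0 < a ∨ 0 < c then
    let da := if 0 < a then PySem.Int.mod a 3 else 0
    let dc := if 0 < c then PySem.Int.mod c 3 else 0
    altLoop (if 0 < a then PySem.Int.floordiv a 3 else a)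
            (if 0 < c then PySem.Int.floordiv c 3 else c)
            (result + PySem.Int.mod (dc - da) 3 * power) (power * 3)
  else result
termination_by a.toNat + c.toNat
decreasing_by
  rename_i h
  by_cases h1 : 0 < a <;> by_cases h2 : 0 < c <;> simp only [h1, h2, dif_pos, dif_neg, not_false_iff] <;>
    first
      | (have := pv_fd3_lt a h1; have := pv_fd3_lt c h2; omega)
      | (have := pv_fd3_lt a h1; omega)
      | (have := pv_fd3_lt c h2; omega)
      | (rcases h with h | h
         · exact absurd h h1
         · exact absurd h h2)

def find_b_alt (a : Int) (c : Int) : Int := altLoop a c 0 1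

-- ===== PRECONDITION & SPEC =====
def Spec_find_b (a : Int) (c : Int) (out : Int) : Prop := out = find_b_alt a c
instance (a : Int) (c : Int) (out : Int) : Decidable (Spec_find_b a c out) := by unfold Spec_find_b; infer_instance

-- ===== CLAIM (what is proved, stated in full; the proofs are below) =====
def Claim_equal_find_b : Prop := ∀ (a : Int) (c : Int), Dom_find_b a c → Spec_find_b a c (find_b a c)

-- ===== LEMMAS AND PROOFS =====

-- digit-wise subtraction mod 3 (the common digit operation of both ports)
def pvF (x y : Int) : Int := PySem.Int.mod (y - x) 3

-- LSB-first ternary digits of n (empty for n ≤ 0, matching A's `while n > 0` loop)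
def pvL (n : Int) : List Int :=
  if 0 < n then PySem.Int.mod n 3 :: pvL (PySem.Int.floordiv n 3) else []
termination_by n.toNat
decreasing_by exact pv_fd3_lt _ (by assumption)

-- value of an LSB-first digit list
def pvValL : List Int → Int
  | [] => 0
  | d :: ds => d + 3 * pvValL ds

-- digit-wise pvF of two LSB-first lists, zero-extending the shorter one
def pvW : List Int → List Int → Int
  | [], [] => 0
  | x :: xs, [] => pvF x 0 + 3 * pvW xs []
  | [], y :: ys => pvF 0 y + 3 * pvW [] ys
  | x :: xs, y :: ys => pvF x y + 3 * pvW xs ys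

-- the common mathematical value both ports compute
def pvV (a c : Int) : Int :=
  if 0 < a ∨ 0 < c then
    pvF (if 0 < a then PySem.Int.mod a 3 else 0) (if 0 < c then PySem.Int.mod c 3 else 0)
      + 3 * pvV (if 0 < a then PySem.Int.floordiv a 3 else a)
                (if 0 < c then PySem.Int.floordiv c 3 else c)
  else 0
termination_by a.toNat + c.toNat
decreasing_by
  rename_i h
  by_cases h1 : 0 < a <;> by_cases h2 : 0 < c <;> simp only [h1, h2, dif_pos, dif_neg, not_false_iff] <;>
    first
      | (have := pv_fd3_lt a h1; have := pv_fd3_lt c h2; omega)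
      | (have := pv_fd3_lt a h1; omega)
      | (have := pv_fd3_lt c h2; omega)
      | (rcases h with h | h
         · exact absurd h h1
         · exact absurd h h2)

theorem pvF_zero : pvF 0 0 = 0 := by decide

theorem pvL_pos (n : Int) (h : 0 < n) :
    pvL n = PySem.Int.mod n 3 :: pvL (PySem.Int.floordiv n 3) := by
  conv_lhs => rw [pvL]
  rw [if_pos h]

theorem pvL_neg (n : Int) (h : ¬ 0 < n) : pvL n = [] := by
  conv_lhs => rw [pvL]
  rw [if_neg h]

theorem pvV_pos (a c : Int) (h : 0 < a ∨ 0 < c) :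
    pvV a c = pvF (if 0 < a then PySem.Int.mod a 3 else 0) (if 0 < c then PySem.Int.mod c 3 else 0)
      + 3 * pvV (if 0 < a then PySem.Int.floordiv a 3 else a)
                (if 0 < c then PySem.Int.floordiv c 3 else c) := by
  conv_lhs => rw [pvV]
  rw [if_pos h]

theorem pvV_neg (a c : Int) (h : ¬(0 < a ∨ 0 < c)) : pvV a c = 0 := by
  conv_lhs => rw [pvV]
  rw [if_neg h]

-- === B side ===
theorem altLoop_eq (a c r p : Int) : altLoop a c r p = r + p * pvV a c := by
  fun_induction altLoop a c r p with
  | case1 a c r p h da dc ih =>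
      have hda : da = if 0 < a then PySem.Int.mod a 3 else 0 := rfl
      have hdc : dc = if 0 < c then PySem.Int.mod c 3 else 0 := rfl
      rw [hda, hdc] at ih ⊢
      simp only [dite_eq_ite] at ih ⊢
      rw [ih, pvV_pos a c h]
      simp only [pvF]
      ring
  | case2 a c r p h =>
      rw [pvV_neg a c h]; ring

-- === A side: loops to closed forms ===
theorem toTernaryLoop_eq (n : Int) (acc : List Int) : toTernaryLoop n acc = acc ++ pvL n := by
  fun_induction toTernaryLoop n acc with
  | case1 n acc h ih => rw [ih, pvL_pos n h]; simp
  | case2 n acc h => rw [pvL_neg n h]; simp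

theorem to_ternary_eq (n : Int) :
    to_ternary n = if n = 0 then [0] else (pvL n).reverse := by
  rw [to_ternary, toTernaryLoop_eq]; simp

theorem padLoop_eq (xs : List Int) (t : Nat) :
    padLoop xs t = List.replicate (t - xs.length) 0 ++ xs := by
  fun_induction padLoop xs t with
  | case1 xs h ih =>
      rw [ih]
      have h1 : t - xs.length = (t - (0 :: xs).length) + 1 := by simp; omega
      rw [h1, List.replicate_succ']
      simp
  | case2 xs h =>
      have : t - xs.length = 0 := by omega
      simp [this]

theorem from_ternary_reverse (l : List Int) : from_ternary l.reverse = pvValL l := by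
  induction l with
  | nil => rfl
  | cons d ds ih =>
      rw [pvValL, ← ih]
      simp only [from_ternary, List.reverse_cons, List.foldl_append, List.foldl]
      ring

theorem valL_zipWith (xs : List Int) : ∀ ys : List Int, xs.length = ys.length →
    pvValL (List.zipWith pvF xs ys) = pvW xs ys := by
  induction xs with
  | nil => intro ys h; cases ys with
      | nil => simp [pvValL, pvW]
      | cons y ys => simp at h
  | cons x xs ih => intro ys h; cases ys with
      | nil => simp at h
      | cons y ys =>
          simp only [List.zipWith, pvValL, pvW]
          rw [ih ys (by simpa using h)]

-- w on pure zero lists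
theorem pvW_nil_zeros (j : Nat) : pvW [] (List.replicate j 0) = 0 := by
  induction j with
  | zero => simp [pvW]
  | succ j ih => simp [List.replicate_succ, pvW, ih, pvF_zero]

theorem pvW_zeros_nil (i : Nat) : pvW (List.replicate i 0) [] = 0 := by
  induction i with
  | zero => simp [pvW]
  | succ i ih => simp [List.replicate_succ, pvW, ih, pvF_zero]

theorem pvW_zeros (i j : Nat) : pvW (List.replicate i 0) (List.replicate j 0) = 0 := by
  induction i generalizing j with
  | zero => exact pvW_nil_zeros j
  | succ i ih =>
      cases j with
      | zero => exact pvW_zeros_nil (i + 1)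
      | succ j => simp [List.replicate_succ, pvW, ih j, pvF_zero]

theorem pvW_zeros_left (ys : List Int) : ∀ (i j : Nat),
    pvW (List.replicate i 0) (ys ++ List.replicate j 0) = pvW [] ys := by
  induction ys with
  | nil => intro i j; simpa [pvW] using pvW_zeros i j
  | cons y ys ih =>
      intro i j
      cases i with
      | zero =>
          simp only [List.replicate, List.cons_append, pvW]
          rw [show pvW [] (ys ++ List.replicate j 0) = pvW [] ys from by simpa using ih 0 j]
      | succ i => simp only [List.replicate_succ, List.cons_append, pvW]; rw [ih i j]

theorem pvW_zeros_right (xs : List Int) : ∀ (i j : Nat),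
    pvW (xs ++ List.replicate i 0) (List.replicate j 0) = pvW xs [] := by
  induction xs with
  | nil => intro i j; simpa [pvW] using pvW_zeros i j
  | cons x xs ih =>
      intro i j
      cases j with
      | zero =>
          simp only [List.replicate, List.cons_append, pvW]
          rw [show pvW (xs ++ List.replicate i 0) [] = pvW xs [] from by simpa using ih i 0]
      | succ j => simp only [List.replicate_succ, List.cons_append, pvW]; rw [ih i j]

theorem pvW_append_zeros (xs : List Int) : ∀ (ys : List Int) (i j : Nat),
    pvW (xs ++ List.replicate i 0) (ys ++ List.replicate j 0) = pvW xs ys := by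
  induction xs with
  | nil => intro ys i j; simpa using pvW_zeros_left ys i j
  | cons x xs ih =>
      intro ys i j
      cases ys with
      | nil => simpa using pvW_zeros_right (x :: xs) i j
      | cons y ys => simp only [List.cons_append, pvW]; rw [ih ys i j]

theorem pvW_L_eq_V (a c : Int) : pvW (pvL a) (pvL c) = pvV a c := by
  fun_induction pvV a c with
  | case1 a c h ih =>
      simp only [dite_eq_ite] at ih
      by_cases ha : 0 < a <;> by_cases hc : 0 < c
      · simp only [if_pos ha, if_pos hc] at ih ⊢
        rw [pvL_pos a ha, pvL_pos c hc]
        simp only [pvW]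
        rw [ih]
      · simp only [if_pos ha, if_neg hc] at ih ⊢
        rw [pvL_pos a ha, pvL_neg c hc]
        simp only [pvW]
        rw [pvL_neg c hc] at ih
        rw [ih]
      · simp only [if_neg ha, if_pos hc] at ih ⊢
        rw [pvL_neg a ha, pvL_pos c hc]
        simp only [pvW]
        rw [pvL_neg a ha] at ih
        rw [ih]
      · exact absurd h (by simp [ha, hc])
  | case2 a c h =>
      have ha : ¬0 < a := fun hh => h (Or.inl hh)
      have hc : ¬0 < c := fun hh => h (Or.inr hh)
      rw [pvL_neg a ha, pvL_neg c hc]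
      simp [pvW]

-- the reversed, padded to_ternary list is pvL plus trailing zeros
theorem padded_reverse (n : Int) (k : Nat) :
    (List.replicate k 0 ++ to_ternary n).reverse
      = pvL n ++ List.replicate ((if n = 0 then 1 else 0) + k) 0 := by
  rw [to_ternary_eq, List.reverse_append, List.reverse_replicate, List.replicate_add]
  by_cases h : n = 0
  · rw [if_pos h, if_pos h]
    rw [pvL_neg n (by omega)]
    simp
  · rw [if_neg h, if_neg h]; simp

theorem find_b_eq_V (a c : Int) : find_b a c = pvV a c := by
  rw [find_b]
  rw [padLoop_eq (to_ternary c), padLoop_eq (to_ternary a)]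
  rw [show (fun a_i c_i => PySem.Int.mod (c_i - a_i) 3) = pvF from rfl]
  set ta := to_ternary a with hta
  set tc := to_ternary c with htc
  set k1 : Nat := tc.length - ta.length with hk1
  set pa : List Int := List.replicate k1 0 ++ ta with hpa
  set k2 : Nat := pa.length - tc.length with hk2
  set pc : List Int := List.replicate k2 0 ++ tc with hpc
  have hlen : pa.length = pc.length := by
    simp only [hpa, hpc, List.length_append, List.length_replicate, hk1, hk2]
    omega
  have hrev : (List.zipWith pvF pa pc).reverse = List.zipWith pvF pa.reverse pc.reverse :=
    List.reverse_zipWith hlen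
  have h1 : from_ternary (List.zipWith pvF pa pc) = pvW pa.reverse pc.reverse := by
    calc from_ternary (List.zipWith pvF pa pc)
        = from_ternary (List.zipWith pvF pa.reverse pc.reverse).reverse := by
          rw [← hrev, List.reverse_reverse]
      _ = pvValL (List.zipWith pvF pa.reverse pc.reverse) := from_ternary_reverse _
      _ = pvW pa.reverse pc.reverse := valL_zipWith _ _ (by simp [hlen])
  rw [h1, hpa, hpc, hta, htc, padded_reverse, padded_reverse, pvW_append_zeros, pvW_L_eq_V]

-- ===== VERDICT (by name: the statement is the Claim_ definition above) =====
theorem find_b_spec : Claim_equal_find_b := by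
  intro a c _
  show find_b a c = find_b_alt a c
  rw [find_b_eq_V, find_b_alt, altLoop_eq]
  ring
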